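-- pv_equiv track=rewrite | github.com/techietristan/advent_of_code_2024 | day08.py | get_harmonic_antinodes
-- ===== SOURCE A (Python) =====
-- from math import gcd
--
-- def get_frequencies(antenna_map: list[str]) -> set[str]:
--     frequencies: set[str] = set()
--     for line in antenna_map:
--         frequencies = set( set(line) | frequencies )
--
--     return set( frequency for frequency in frequencies if frequency != '.')
--
-- def get_antenna_locations_by_frequency(antenna_map: list[str], frequency: str) -> tuple[tuple[int, int]]:
--     antenna_locations: list = []
--     for row_index, line in enumerate(antenna_map):
--         for column_index, char in enumerate(list(line)):
--             if char == frequency: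
--                 antenna_locations = [ (row_index, column_index) ] + antenna_locations
--
--     return tuple(antenna_locations)
--
-- def location_is_on_map(antenna_map: list[str], antinode_location: tuple[int, int]) -> bool:
--     rows, columns = len(antenna_map), len(antenna_map[0])
--     row, column = antinode_location
--     in_row: bool = 0 <= row < rows
--     in_column: bool = 0<= column < columns
--
--     return in_row and in_column
--
-- def get_antenna_vector(ant1: tuple[int, int], ant2: tuple[int, int]) -> tuple[int, int]:
--     ant1_row, ant1_column = ant1
--     ant2_row, ant2_column = ant2
--     vector: tuple[int, int] = ( ant1_row - ant2_row, ant1_column - ant2_column )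
--
--     return vector
--
-- def get_antinodes_on_vector(antenna_map: list[str], vector: tuple[int, int], antenna: tuple[int, int]) -> set[tuple[int, int]]:
--     antinodes_on_vector: set[tuple[int, int]] = set()
--     row, column = antenna
--     y_diff, x_diff = vector
--     vector_gcd: int = gcd(y_diff, x_diff)
--     next_diff: tuple[int, int] = (int(y_diff/vector_gcd), int(x_diff/vector_gcd))
--     next_coord: tuple[int, int] = (row + next_diff[0], column + next_diff[1])
--     while location_is_on_map(antenna_map, next_coord):
--         antinodes_on_vector.add(next_coord)
--         row, column = next_coord
--         next_coord = (row + next_diff[0], column + next_diff[1])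
--
--     return antinodes_on_vector
--
-- def get_harmonic_antinodes(antenna_map: list[str]) -> set[tuple[int, int]]:
--     harmonic_antinodes: set[tuple[int, int]] = set()
--     for frequency in get_frequencies(antenna_map):
--         antenna_locations: tuple[tuple[int, int]] = get_antenna_locations_by_frequency(antenna_map, frequency)
--         if len(antenna_locations) > 1:
--             harmonic_antinodes = set( harmonic_antinodes | set(antenna_locations) )
--         for ant1 in antenna_locations:
--             for ant2 in antenna_locations:
--                 if ant1 != ant2:
--                     vector: tuple[int, int] = get_antenna_vector(ant1, ant2)
--                     harmonic_antinodes = set( harmonic_antinodes | get_antinodes_on_vector(antenna_map, vector, ant1)) #type: ignore[arg-type]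
--     return harmonic_antinodes
-- ===== SOURCE B (Python) =====
-- from math import gcd
--
-- def span(position, size, step):
--     # largest k >= 0 such that position + i*step stays inside [0, size)
--     # for every i in 1..k (None means every k works)
--     if step > 0:
--         return max((size - 1 - position) // step, 0)
--     if step < 0:
--         return position // -step if position + step < size else 0
--     return None if 0 <= position < size else 0
--
-- def get_harmonic_antinodes(antenna_map):
--     rows = len(antenna_map)
--     cols = len(antenna_map[0]) if antenna_map else 0
--     # one pass over the grid: antenna coordinates grouped by frequency
--     spots = {}
--     for row, line in enumerate(antenna_map):
--         for col, char in enumerate(line):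
--             if char != '.':
--                 spots[char] = [(row, col)] + spots.get(char, [])
--     # flat candidate list, deduplicated once at the end
--     candidates = []
--     for antennas in spots.values():
--         if len(antennas) > 1:
--             candidates += antennas
--         for r1, c1 in antennas:
--             for r2, c2 in antennas:
--                 if (r1, c1) == (r2, c2):
--                     continue
--                 g = gcd(r1 - r2, c1 - c2)
--                 dy, dx = (r1 - r2) // g, (c1 - c2) // g
--                 kr, kc = span(r1, rows, dy), span(c1, cols, dx)
--                 if kr is None:
--                     k = 0 if kc is None else kc
--                 elif kc is None:
--                     k = kr
--                 else:
--                     k = min(kr, kc)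
--                 candidates += [(r1 + i * dy, c1 + i * dx) for i in range(1, k + 1)]
--     return set(candidates)
-- ===== Notes on version B (the rewrite author's own statement) =====
-- stated objective: faster
-- what changed: B replaces A's per-frequency full-grid rescans (get_frequencies plus one whole-map scan per frequency) by a single grouping pass building a dict from frequency to antenna coordinates, replaces A's incremental set-union accumulation (a fresh set copy per antenna pair) by one flat candidate list deduplicated once at the end, and replaces the cell-by-cell while-walk along each ray by a closed-form count of in-grid step multiples.
import Mathlib
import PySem

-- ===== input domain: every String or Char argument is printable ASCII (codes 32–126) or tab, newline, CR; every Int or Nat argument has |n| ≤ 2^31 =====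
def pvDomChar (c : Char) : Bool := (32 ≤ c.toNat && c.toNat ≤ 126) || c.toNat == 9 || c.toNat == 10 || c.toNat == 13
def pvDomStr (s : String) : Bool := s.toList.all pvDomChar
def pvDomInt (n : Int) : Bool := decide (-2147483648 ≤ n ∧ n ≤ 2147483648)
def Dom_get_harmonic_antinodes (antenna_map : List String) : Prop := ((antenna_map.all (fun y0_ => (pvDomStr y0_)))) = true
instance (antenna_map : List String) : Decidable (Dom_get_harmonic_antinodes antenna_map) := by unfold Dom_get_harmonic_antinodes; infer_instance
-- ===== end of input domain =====

-- B replaces A's per-frequency full-grid rescans by one grouping pass over the grid, A's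
-- incremental set-union accumulation by a single flat candidate list deduplicated once at the
-- end, and A's cell-by-cell while-walk along each antenna ray by a closed-form step count;
-- objective: faster by a constant factor (the returned set is identical).

-- ===== PORT A =====
def get_frequencies (antenna_map : List String) : PySem.Set Char :=
  -- `set(set(line) | frequencies)`: the operand order of a Python set union is unobservable
  -- (a set has no order); it is written accumulator-first here
  let frequencies : PySem.Set Char :=
    antenna_map.foldl (fun frequencies line =>
      PySem.Set.ofList (PySem.Set.union frequencies (PySem.Set.ofList line.toList))) []
  PySem.Set.ofList (frequencies.filter (fun frequency => frequency ≠ '.'))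

def get_antenna_locations_by_frequency (antenna_map : List String) (frequency : Char) :
    List (Int × Int) :=
  (PySem.List.enumerate antenna_map).foldl (fun antenna_locations p =>
    (PySem.List.enumerate p.2.toList).foldl (fun antenna_locations q =>
      if q.2 = frequency then [(p.1, q.1)] ++ antenna_locations else antenna_locations)
      antenna_locations) []

def location_is_on_map (antenna_map : List String) (antinode_location : Int × Int) : Bool :=
  let rows : Int := antenna_map.length
  let columns : Int := PySem.Str.len (PySem.List.pyGetD antenna_map 0 "")
  let in_row : Bool := 0 ≤ antinode_location.1 ∧ antinode_location.1 < rows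
  let in_column : Bool := 0 ≤ antinode_location.2 ∧ antinode_location.2 < columns
  in_row && in_column

def get_antenna_vector (ant1 ant2 : Int × Int) : Int × Int :=
  (ant1.1 - ant2.1, ant1.2 - ant2.2)

-- the while loop of get_antinodes_on_vector; the fuel is an upper bound on the number of
-- iterations (proved sufficient in the lemmas below), each iteration is Python's loop body
def walkA (antenna_map : List String) (next_diff : Int × Int) :
    Nat → Int × Int → PySem.Set (Int × Int) → PySem.Set (Int × Int)
  | 0, _, acc => acc
  | fuel + 1, next_coord, acc =>
      if location_is_on_map antenna_map next_coord then
        walkA antenna_map next_diff fuel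
          (next_coord.1 + next_diff.1, next_coord.2 + next_diff.2)
          (PySem.Set.add acc next_coord)
      else acc

def get_antinodes_on_vector (antenna_map : List String) (vector antenna : Int × Int) :
    PySem.Set (Int × Int) :=
  let vector_gcd : Int := Int.gcd vector.1 vector.2
  let next_diff : Int × Int :=
    (PySem.Int.truncdiv vector.1 vector_gcd, PySem.Int.truncdiv vector.2 vector_gcd)
  let fuel : Nat := antenna_map.length +
    (PySem.Str.len (PySem.List.pyGetD antenna_map 0 "")).toNat + antenna.2.natAbs + 2
  walkA antenna_map next_diff fuel (antenna.1 + next_diff.1, antenna.2 + next_diff.2) []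

def get_harmonic_antinodes (antenna_map : List String) : List (Int × Int) :=
  (get_frequencies antenna_map).foldl (fun harmonic_antinodes frequency =>
    let antenna_locations := get_antenna_locations_by_frequency antenna_map frequency
    let harmonic_antinodes :=
      if antenna_locations.length > 1 then
        PySem.Set.ofList (PySem.Set.union harmonic_antinodes (PySem.Set.ofList antenna_locations))
      else harmonic_antinodes
    antenna_locations.foldl (fun harmonic_antinodes ant1 =>
      antenna_locations.foldl (fun harmonic_antinodes ant2 =>
        if ant1 ≠ ant2 then
          PySem.Set.ofList (PySem.Set.union harmonic_antinodes
            (get_antinodes_on_vector antenna_map (get_antenna_vector ant1 ant2) ant1))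
        else harmonic_antinodes) harmonic_antinodes) harmonic_antinodes) []

-- ===== PORT B =====
def span (position size step : Int) : Option Int :=
  if step > 0 then some (max (PySem.Int.floordiv (size - 1 - position) step) 0)
  else if step < 0 then
    (if position + step < size then some (PySem.Int.floordiv position (-step)) else some 0)
  else if 0 ≤ position ∧ position < size then none else some 0

def get_harmonic_antinodes_alt (antenna_map : List String) : List (Int × Int) :=
  let rows : Int := antenna_map.length
  let cols : Int :=
    if antenna_map ≠ [] then PySem.Str.len (PySem.List.pyGetD antenna_map 0 "") else 0
  let spots : PySem.Dict Char (List (Int × Int)) :=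
    (PySem.List.enumerate antenna_map).foldl (fun spots p =>
      (PySem.List.enumerate p.2.toList).foldl (fun spots q =>
        if q.2 ≠ '.' then spots.insert q.2 ([(p.1, q.1)] ++ spots.getD q.2 []) else spots) spots)
      PySem.Dict.empty
  let candidates : List (Int × Int) :=
    (PySem.Dict.values spots).foldl (fun candidates antennas =>
      let candidates := if antennas.length > 1 then candidates ++ antennas else candidates
      antennas.foldl (fun candidates a1 =>
        antennas.foldl (fun candidates a2 =>
          if a1 = a2 then candidates
          else
            let g : Int := Int.gcd (a1.1 - a2.1) (a1.2 - a2.2)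
            let dy : Int := PySem.Int.floordiv (a1.1 - a2.1) g
            let dx : Int := PySem.Int.floordiv (a1.2 - a2.2) g
            let kr := span a1.1 rows dy
            let kc := span a1.2 cols dx
            let k : Int :=
              match kr, kc with
              | none, none => 0
              | none, some kc => kc
              | some kr, none => kr
              | some kr, some kc => min kr kc
            candidates ++ (PySem.List.pyRange 1 (k + 1) 1).map
              (fun i => (a1.1 + i * dy, a1.2 + i * dx)))
          candidates) candidates) []
  PySem.Set.ofList candidates

-- ===== PRECONDITION & SPEC =====
def Spec_get_harmonic_antinodes (antenna_map : List String) (out : List (Int × Int)) : Prop := out = get_harmonic_antinodes_alt antenna_map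
instance (antenna_map : List String) (out : List (Int × Int)) : Decidable (Spec_get_harmonic_antinodes antenna_map out) := by unfold Spec_get_harmonic_antinodes; infer_instance

-- ===== CLAIM (what is proved, stated in full; the proofs are below) =====
def Claim_equal_get_harmonic_antinodes : Prop := ∀ (antenna_map : List String), Dom_get_harmonic_antinodes antenna_map → Spec_get_harmonic_antinodes antenna_map (get_harmonic_antinodes antenna_map)

-- ===== LEMMAS AND PROOFS =====

-- B's per-pair ray written as one closed list (the exact list B's pair step appends)
def pvRay (m : List String) (a1 a2 : Int × Int) : List (Int × Int) :=
  let g : Int := Int.gcd (a1.1 - a2.1) (a1.2 - a2.2)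
  let dy : Int := PySem.Int.floordiv (a1.1 - a2.1) g
  let dx : Int := PySem.Int.floordiv (a1.2 - a2.2) g
  let kr := span a1.1 (m.length : Int) dy
  let kc := span a1.2 (if m ≠ [] then PySem.Str.len (PySem.List.pyGetD m 0 "") else 0) dx
  let k : Int :=
    match kr, kc with
    | none, none => 0
    | none, some kc => kc
    | some kr, none => kr
    | some kr, some kc => min kr kc
  (PySem.List.pyRange 1 (k + 1) 1).map (fun i => (a1.1 + i * dy, a1.2 + i * dx))

-- ofList of a union of two ofLists is the ofList of the concatenation
lemma pvUnion {b : Type} [BEq b] [LawfulBEq b] (x y : List b) :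
    PySem.Set.ofList (PySem.Set.union (PySem.Set.ofList x) (PySem.Set.ofList y))
    = PySem.Set.ofList (x ++ y) := by
  show PySem.Set.ofList (PySem.Set.update (PySem.Set.ofList x) (PySem.Set.ofList y)) = _
  rw [PySem.Set.update_eq_append_filter, PySem.Set.ofList_ofList,
      ← PySem.Set.update_eq_append_filter, ← PySem.Set.ofList_append, PySem.Set.ofList_ofList]

-- ofList commutes with filter
lemma pvFilterOfList {b : Type} [BEq b] [LawfulBEq b] (l : List b) (p : b → Bool) :
    PySem.Set.ofList (l.filter p) = (PySem.Set.ofList l).filter p := by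
  induction l using List.reverseRecOn with
  | nil => rfl
  | append_singleton xs x ih =>
    rw [List.filter_append, PySem.Set.ofList_append_singleton, PySem.Set.add_eq_ite]
    by_cases hp : p x
    · simp only [List.filter_cons, hp, List.filter_nil, if_true]
      rw [PySem.Set.ofList_append_singleton, ih, PySem.Set.add_eq_ite]
      by_cases hm : x ∈ PySem.Set.ofList xs
      · rw [if_pos hm, if_pos]
        simp only [PySem.Set.mem_ofList] at hm
        simp only [List.mem_filter, PySem.Set.mem_ofList]
        exact ⟨hm, hp⟩
      · rw [if_neg hm, if_neg, List.filter_append]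
        · simp [hp]
        · intro hc
          exact hm (by simpa [PySem.Set.mem_ofList] using (List.mem_filter.mp hc).1)
    · by_cases hm : x ∈ PySem.Set.ofList xs
      · rw [if_pos hm]
        simp [hp, ih]
      · rw [if_neg hm, List.filter_append]
        simp [hp, ih]

-- A's fold of set unions over the lines collects the first occurrences of the flattened
-- character stream in order
lemma pvFreqFold (ls : List String) (S : List Char) :
    ls.foldl (fun F line =>
      PySem.Set.ofList (PySem.Set.union F (PySem.Set.ofList line.toList))) (PySem.Set.ofList S)
    = PySem.Set.ofList (S ++ ((ls.map String.toList)).flatten) := by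
  induction ls generalizing S with
  | nil => simp
  | cons l ls ih =>
    simp only [List.foldl_cons]
    rw [pvUnion, ih (S ++ l.toList)]
    simp [List.append_assoc]

lemma pvFreqs (m : List String) :
    get_frequencies m
    = PySem.Set.ofList (((m.map String.toList).flatten).filter (fun c => decide (c ≠ '.'))) := by
  unfold get_frequencies
  rw [show ([] : PySem.Set Char) = PySem.Set.ofList [] from rfl, pvFreqFold]
  simp only [List.nil_append]
  rw [← pvFilterOfList, PySem.Set.ofList_ofList]

lemma pvFreqNoDot (m : List String) (f : Char) (hf : f ∈ get_frequencies m) : f ≠ '.' := by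
  rw [pvFreqs] at hf
  have := (List.mem_filter.mp ((PySem.Set.mem_ofList _ _).mp hf)).2
  simpa using this

-- the grid scan, flattened into one stream of (row, col, char) triples
def pvOcc (m : List String) : List (Int × Int × Char) :=
  ((PySem.List.enumerate m).map (fun p =>
    (PySem.List.enumerate p.2.toList).map (fun q => (p.1, q.1, q.2)))).flatten

def pvStep (f : Char) (acc : List (Int × Int)) (t : Int × Int × Char) : List (Int × Int) :=
  if t.2.2 = f then [(t.1, t.2.1)] ++ acc else acc

def pvDStep (d : PySem.Dict Char (List (Int × Int))) (t : Int × Int × Char) :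
    PySem.Dict Char (List (Int × Int)) :=
  if t.2.2 ≠ '.' then d.insert t.2.2 ([(t.1, t.2.1)] ++ d.getD t.2.2 []) else d

lemma pvLocsFlat (m : List String) (f : Char) :
    get_antenna_locations_by_frequency m f = (pvOcc m).foldl (pvStep f) [] := by
  unfold get_antenna_locations_by_frequency pvOcc
  simp only [List.foldl_flatten, List.foldl_map]
  rfl

lemma pvSpotsFlat (m : List String) :
    (PySem.List.enumerate m).foldl (fun spots p =>
      (PySem.List.enumerate p.2.toList).foldl (fun spots q =>
        if q.2 ≠ '.' then spots.insert q.2 ([(p.1, q.1)] ++ spots.getD q.2 [])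
        else spots) spots) PySem.Dict.empty
    = (pvOcc m).foldl pvDStep PySem.Dict.empty := by
  unfold pvOcc
  simp only [List.foldl_flatten, List.foldl_map]
  rfl

lemma pvGetDFold (stream : List (Int × Int × Char)) (f : Char) (hf : f ≠ '.') :
    ∀ d : PySem.Dict Char (List (Int × Int)),
    (stream.foldl pvDStep d).getD f [] = stream.foldl (pvStep f) (d.getD f []) := by
  induction stream with
  | nil => intro d; rfl
  | cons t ts ih =>
    intro d
    simp only [List.foldl_cons]
    rw [ih]
    congr 1
    unfold pvDStep pvStep
    by_cases hef : t.2.2 = f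
    · rw [if_pos (by rw [hef]; exact hf), if_pos hef, hef, PySem.Dict.getD_insert_self]
    · rw [if_neg hef]
      by_cases hd : t.2.2 ≠ '.'
      · rw [if_pos hd, PySem.Dict.getD_insert_of_ne d _ _ (fun h : f = t.2.2 => hef h.symm)]
      · rw [if_neg hd]

-- B's grouping dict holds exactly A's per-frequency location lists
lemma pvLocs (m : List String) (f : Char) (hf : f ≠ '.') :
    ((pvOcc m).foldl pvDStep PySem.Dict.empty).getD f []
    = get_antenna_locations_by_frequency m f := by
  rw [pvGetDFold _ f hf, PySem.Dict.getD_empty, pvLocsFlat]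

-- the characters of the occurrence stream are the flattened grid
lemma pvOccChars (m : List String) :
    (pvOcc m).map (fun t => t.2.2) = (m.map String.toList).flatten := by
  unfold pvOcc
  rw [List.map_flatten, List.map_map]
  have h1 : ((List.map (fun t : Int × Int × Char => t.2.2)) ∘ fun p : Int × String =>
        (PySem.List.enumerate p.2.toList).map (fun q => (p.1, q.1, q.2)))
      = fun p : Int × String => p.2.toList := by
    funext p
    simp only [Function.comp, List.map_map]
    exact PySem.List.map_snd_enumerate p.2.toList 0
  rw [h1]
  have h2 : (PySem.List.enumerate m).map (fun p => p.2.toList)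
      = ((PySem.List.enumerate m).map (fun p => p.2)).map String.toList := by
    rw [List.map_map]; rfl
  rw [h2, PySem.List.map_snd_enumerate]

-- the conditional insert loop, as a plain insert loop over the filtered stream
lemma pvDictFilter (m : List String) :
    (pvOcc m).foldl pvDStep PySem.Dict.empty
    = ((pvOcc m).filter (fun t => decide (t.2.2 ≠ '.'))).foldl
        (fun d t => d.insert t.2.2 ([(t.1, t.2.1)] ++ d.getD t.2.2 [])) PySem.Dict.empty := by
  unfold pvDStep
  rw [PySem.List.foldl_ite_eq_foldl_filter]

-- the dict's key list is exactly A's frequency set, in order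
lemma pvKeys (m : List String) :
    ((pvOcc m).foldl pvDStep PySem.Dict.empty).keys = get_frequencies m := by
  rw [pvDictFilter, PySem.Dict.keys_foldl_insert_key, PySem.Dict.keys_empty,
      PySem.Set.update_nil_left]
  have h1 : ((pvOcc m).filter (fun t => decide (t.2.2 ≠ '.'))).map (fun t => t.2.2)
      = ((pvOcc m).map (fun t => t.2.2)).filter (fun c => decide (c ≠ '.')) := by
    rw [List.filter_map]
    rfl
  rw [h1, pvOccChars, ← pvFreqs]

lemma pvKeysNodup (m : List String) :
    ((pvOcc m).foldl pvDStep PySem.Dict.empty).keys.Nodup := by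
  rw [pvKeys, pvFreqs]
  exact PySem.Set.nodup_ofList _

lemma pvFoldMem (f : Char) :
    ∀ (stream : List (Int × Int × Char)) (acc : List (Int × Int))
      (x : Int × Int), x ∈ stream.foldl (pvStep f) acc →
      x ∈ acc ∨ ∃ t ∈ stream, x = (t.1, t.2.1) := by
  intro stream
  induction stream with
  | nil => intro acc x hx; exact Or.inl hx
  | cons t ts ih =>
    intro acc x hx
    simp only [List.foldl_cons] at hx
    rcases ih _ x hx with h | ⟨u, hu, rfl⟩
    · unfold pvStep at h
      by_cases hc : t.2.2 = f
      · rw [if_pos hc] at h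
        rcases List.mem_append.mp h with h1 | h2
        · exact Or.inr ⟨t, List.mem_cons_self .., by simpa using h1⟩
        · exact Or.inl h2
      · rw [if_neg hc] at h; exact Or.inl h
    · exact Or.inr ⟨u, List.mem_cons_of_mem _ hu, rfl⟩

lemma pvOccMem (m : List String) (t : Int × Int × Char) (ht : t ∈ pvOcc m) :
    0 ≤ t.1 ∧ t.1 < (m.length : Int) ∧ 0 ≤ t.2.1 := by
  unfold pvOcc at ht
  rw [List.mem_flatten] at ht
  obtain ⟨l, hl, htl⟩ := ht
  rw [List.mem_map] at hl
  obtain ⟨p, hp, rfl⟩ := hl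
  rw [List.mem_map] at htl
  obtain ⟨q, hq, rfl⟩ := htl
  rw [PySem.List.mem_enumerate_iff] at hp hq
  obtain ⟨k, hk, rfl⟩ := hp
  obtain ⟨k2, hk2, rfl⟩ := hq
  dsimp only
  refine ⟨by omega, by omega, by omega⟩

-- every antenna location is a valid row index with a nonnegative column
lemma pvLocsMem (m : List String) (f : Char) (x : Int × Int)
    (hx : x ∈ get_antenna_locations_by_frequency m f) :
    0 ≤ x.1 ∧ x.1 < (m.length : Int) ∧ 0 ≤ x.2 := by
  rw [pvLocsFlat] at hx
  rcases pvFoldMem f _ [] x hx with h | ⟨t, ht, rfl⟩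
  · simp at h
  · have := pvOccMem m t ht
    exact ⟨this.1, this.2.1, this.2.2⟩

lemma pvSpanSome (p size d K : Int) (hp : 0 ≤ p) (h : span p size d = some K) :
    0 ≤ K ∧ K ≤ max p (max size 0) ∧
    (∀ i : Int, 1 ≤ i → i ≤ K → 0 ≤ p + i * d ∧ p + i * d < size) ∧
    ¬(0 ≤ p + (K + 1) * d ∧ p + (K + 1) * d < size) := by
  unfold span at h
  split_ifs at h with hd1 hd2 hd3 hd4
  · -- d > 0
    set F := PySem.Int.floordiv (size - 1 - p) d with hF
    have hK : K = max F 0 := (Option.some.inj h).symm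
    have hiff : ∀ q : Int, q ≤ F ↔ q * d ≤ size - 1 - p :=
      fun q => PySem.Int.le_floordiv_iff_mul_le hd1
    have hbound : K ≤ max p (max size 0) := by
      by_cases hF0 : F ≤ 0
      · omega
      · have hFd : F * d ≤ size - 1 - p := (hiff F).mp le_rfl
        have hF2 : F ≤ size - 1 - p := by nlinarith
        omega
    refine ⟨by omega, hbound, ?_, ?_⟩
    · intro i hi1 hiK
      have hiF : i ≤ F := by omega
      have h1 : i * d ≤ size - 1 - p := (hiff i).mp hiF
      have h2 : 0 ≤ i * d := mul_nonneg (by omega) (by omega)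
      constructor <;> linarith
    · rintro ⟨-, hlt⟩
      have hKF : ¬ (K + 1 ≤ F) := by omega
      have h2 : ¬ ((K + 1) * d ≤ size - 1 - p) := fun hcon => hKF ((hiff (K + 1)).mpr hcon)
      push_neg at h2
      linarith
  · -- d < 0, p + d < size
    set e : Int := -d with he
    have hepos : 0 < e := by omega
    have hiff : ∀ q : Int, q ≤ PySem.Int.floordiv p e ↔ q * e ≤ p :=
      fun q => PySem.Int.le_floordiv_iff_mul_le hepos
    set F := PySem.Int.floordiv p e with hF
    have hK : K = F := (Option.some.inj h).symm
    have hF0 : 0 ≤ F := (hiff 0).mpr (by simpa using hp)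
    have hFd : F * e ≤ p := (hiff F).mp le_rfl
    have hFp : F ≤ p := by nlinarith
    refine ⟨by omega, by omega, ?_, ?_⟩
    · intro i hi1 hiK
      have h1 : i * e ≤ p := (hiff i).mp (by omega)
      have h2 : i * d = -(i * e) := by rw [he]; ring
      have h3 : e ≤ i * e := by nlinarith
      constructor
      · linarith
      · have h4 : p + i * d ≤ p + d := by
          rw [h2]
          omega
        linarith
    · rintro ⟨hge, -⟩
      have hKF : ¬ (K + 1 ≤ F) := by omega
      have h2 : ¬ ((K + 1) * e ≤ p) := fun hcon => hKF ((hiff (K + 1)).mpr hcon)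
      push_neg at h2
      have h3 : (K + 1) * d = -((K + 1) * e) := by rw [he]; ring
      linarith
  · -- d < 0, p + d ≥ size
    have hK : K = 0 := (Option.some.inj h).symm
    refine ⟨by omega, by omega, by omega, ?_⟩
    rintro ⟨-, hlt⟩
    rw [hK] at hlt
    have h4 : (0 + 1) * d = d := by ring
    rw [h4] at hlt
    omega
  · -- d = 0, p outside [0, size)
    have hd0 : d = 0 := by omega
    have hK : K = 0 := (Option.some.inj h).symm
    refine ⟨by omega, by omega, by omega, ?_⟩
    rintro ⟨hge, hlt⟩
    rw [hd0] at hge hlt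
    simp at hge hlt
    exact hd4 ⟨by omega, by omega⟩

lemma pvSpanNone (p size d : Int) (h : span p size d = none) :
    d = 0 ∧ 0 ≤ p ∧ p < size := by
  unfold span at h
  split_ifs at h with hd1 hd2 hd3 hd4
  · exact ⟨by omega, hd4.1, hd4.2⟩

lemma pvOnMapIff (m : List String) (x : Int × Int) :
    location_is_on_map m x = true ↔
    (0 ≤ x.1 ∧ x.1 < (m.length : Int)) ∧
    (0 ≤ x.2 ∧ x.2 < PySem.Str.len (PySem.List.pyGetD m 0 "")) := by
  unfold location_is_on_map
  simp only [Bool.and_eq_true, decide_eq_true_eq]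

-- the while loop visits exactly the K in-grid multiples of the step, in order
lemma pvWalkEq (m : List String) (r c dy dx K : Int)
    (hOn : ∀ i : Int, 1 ≤ i → i ≤ K → location_is_on_map m (r + i * dy, c + i * dx) = true)
    (hOff : location_is_on_map m (r + (K + 1) * dy, c + (K + 1) * dx) = false) :
    ∀ (fuel : Nat) (j : Int) (acc : PySem.Set (Int × Int)), 1 ≤ j → j ≤ K + 1 →
      (K + 2 - j).toNat ≤ fuel →
      walkA m (dy, dx) fuel (r + j * dy, c + j * dx) acc
      = (PySem.List.pyRange j (K + 1) 1).foldl
          (fun a i => PySem.Set.add a (r + i * dy, c + i * dx)) acc := by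
  intro fuel
  induction fuel with
  | zero =>
    intro j acc h1 h2 h3
    exact absurd h3 (by omega)
  | succ fuel ih =>
    intro j acc h1 h2 h3
    rcases lt_or_eq_of_le h2 with hj | hj
    · have hon := hOn j h1 (by omega)
      have hcoord1 : r + j * dy + dy = r + (j + 1) * dy := by ring
      have hcoord2 : c + j * dx + dx = c + (j + 1) * dx := by ring
      simp only [walkA, hon, if_true]
      rw [PySem.List.pyRange_one_cons (by omega : j < K + 1), List.foldl_cons]
      rw [show (r + j * dy, c + j * dx).1 + dy = r + (j + 1) * dy from hcoord1,
          show (r + j * dy, c + j * dx).2 + dx = c + (j + 1) * dx from hcoord2]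
      exact ih (j + 1) (PySem.Set.add acc (r + j * dy, c + j * dx)) (by omega) (by omega) (by omega)
    · subst hj
      simp only [walkA, hOff]
      rw [PySem.List.pyRange_one_eq_nil le_rfl]
      simp

-- the per-pair step: A's reduced-gcd while-walk is the ofList of B's closed-form ray
lemma pvAnti (m : List String) (a1 a2 : Int × Int)
    (h1 : 0 ≤ a1.1 ∧ a1.1 < (m.length : Int) ∧ 0 ≤ a1.2) (hne : a1 ≠ a2) :
    get_antinodes_on_vector m (get_antenna_vector a1 a2) a1
    = PySem.Set.ofList (pvRay m a1 a2) := by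
  obtain ⟨hr0, hrlt, hc0⟩ := h1
  have hmne : m ≠ [] := by
    intro hm
    rw [hm] at hrlt
    simp at hrlt
    omega
  have hcolseq := PySem.Str.len_eq (PySem.List.pyGetD m 0 "")
  have hcolsnn : 0 ≤ PySem.Str.len (PySem.List.pyGetD m 0 "") := by omega
  have hv : a1.1 - a2.1 ≠ 0 ∨ a1.2 - a2.2 ≠ 0 := by
    by_contra hcon
    push_neg at hcon
    exact hne (by rw [Prod.ext_iff]; constructor <;> omega)
  have hgpos : (0 : Int) < (Int.gcd (a1.1 - a2.1) (a1.2 - a2.2) : Int) := by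
    have hne0 : (a1.1 - a2.1).gcd (a1.2 - a2.2) ≠ 0 := by
      rw [Ne, Int.gcd_eq_zero_iff]
      tauto
    omega
  have hdvd1 : ((Int.gcd (a1.1 - a2.1) (a1.2 - a2.2) : Int)) ∣ (a1.1 - a2.1) := Int.gcd_dvd_left _ _
  have hdvd2 : ((Int.gcd (a1.1 - a2.1) (a1.2 - a2.2) : Int)) ∣ (a1.2 - a2.2) := Int.gcd_dvd_right _ _
  set g : Int := (Int.gcd (a1.1 - a2.1) (a1.2 - a2.2) : Int) with hgdef
  set dy := PySem.Int.floordiv (a1.1 - a2.1) g with hdydef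
  set dx := PySem.Int.floordiv (a1.2 - a2.2) g with hdxdef
  have htd1 : PySem.Int.truncdiv (a1.1 - a2.1) g = dy := by
    obtain ⟨q, hq⟩ := hdvd1
    rw [hdydef, hq, show PySem.Int.truncdiv (g * q) g = (g * q).tdiv g from rfl,
        PySem.Int.floordiv_eq_ediv_of_pos hgpos,
        Int.mul_tdiv_cancel_left _ (by omega), Int.mul_ediv_cancel_left _ (by omega)]
  have htd2 : PySem.Int.truncdiv (a1.2 - a2.2) g = dx := by
    obtain ⟨q, hq⟩ := hdvd2
    rw [hdxdef, hq, show PySem.Int.truncdiv (g * q) g = (g * q).tdiv g from rfl,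
        PySem.Int.floordiv_eq_ediv_of_pos hgpos,
        Int.mul_tdiv_cancel_left _ (by omega), Int.mul_ediv_cancel_left _ (by omega)]
  have hy : dy * g = a1.1 - a2.1 := by
    rw [hdydef, PySem.Int.floordiv_eq_ediv_of_pos hgpos]
    exact Int.ediv_mul_cancel hdvd1
  have hx : dx * g = a1.2 - a2.2 := by
    rw [hdxdef, PySem.Int.floordiv_eq_ediv_of_pos hgpos]
    exact Int.ediv_mul_cancel hdvd2
  have hd0 : ¬(dy = 0 ∧ dx = 0) := by
    rintro ⟨e1, e2⟩
    rw [e1, zero_mul] at hy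
    rw [e2, zero_mul] at hx
    rcases hv with h | h <;> omega
  have hcolsite : (if m ≠ [] then PySem.Str.len (PySem.List.pyGetD m 0 "") else 0)
      = PySem.Str.len (PySem.List.pyGetD m 0 "") := if_pos hmne
  obtain ⟨K, hKmatch, hK0, hKb, hOn, hOff⟩ :
      ∃ K : Int,
        (match span a1.1 (m.length : Int) dy,
               span a1.2 (if m ≠ [] then PySem.Str.len (PySem.List.pyGetD m 0 "") else 0) dx with
         | none, none => 0
         | none, some kc => kc
         | some kr, none => kr
         | some kr, some kc => min kr kc) = K ∧
        0 ≤ K ∧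
        K ≤ (m.length : Int) + PySem.Str.len (PySem.List.pyGetD m 0 "") + a1.2 ∧
        (∀ i : Int, 1 ≤ i → i ≤ K →
          location_is_on_map m (a1.1 + i * dy, a1.2 + i * dx) = true) ∧
        location_is_on_map m (a1.1 + (K + 1) * dy, a1.2 + (K + 1) * dx) = false := by
    rw [hcolsite]
    rcases hsy : span a1.1 (m.length : Int) dy with _ | ky <;>
      rcases hsx : span a1.2 (PySem.Str.len (PySem.List.pyGetD m 0 "")) dx with _ | kx
    · obtain ⟨ey, -, -⟩ := pvSpanNone _ _ _ hsy
      obtain ⟨ex, -, -⟩ := pvSpanNone _ _ _ hsx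
      exact absurd ⟨ey, ex⟩ hd0
    · obtain ⟨ey, hy0, hy1⟩ := pvSpanNone _ _ _ hsy
      obtain ⟨hx0, hxb, hxOn, hxOff⟩ := pvSpanSome _ _ _ _ hc0 hsx
      have hb' : kx ≤ a1.2 + PySem.Str.len (PySem.List.pyGetD m 0 "") := by
        rw [max_def, max_def] at hxb
        split_ifs at hxb <;> omega
      refine ⟨kx, rfl, hx0, by omega, ?_, ?_⟩
      · intro i hi1 hiK
        rw [pvOnMapIff]
        refine ⟨?_, hxOn i hi1 hiK⟩
        dsimp only
        rw [ey]
        constructor <;> omega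
      · rw [← Bool.not_eq_true, pvOnMapIff]
        rintro ⟨-, hcol⟩
        exact hxOff hcol
    · obtain ⟨hy0, hyb, hyOn, hyOff⟩ := pvSpanSome _ _ _ _ hr0 hsy
      obtain ⟨ex, hx0, hx1⟩ := pvSpanNone _ _ _ hsx
      have hb' : ky ≤ a1.1 + (m.length : Int) := by
        rw [max_def, max_def] at hyb
        split_ifs at hyb <;> omega
      refine ⟨ky, rfl, hy0, by omega, ?_, ?_⟩
      · intro i hi1 hiK
        rw [pvOnMapIff]
        refine ⟨hyOn i hi1 hiK, ?_⟩
        dsimp only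
        rw [ex]
        constructor <;> omega
      · rw [← Bool.not_eq_true, pvOnMapIff]
        rintro ⟨hrow, -⟩
        exact hyOff hrow
    · obtain ⟨hy0, hyb, hyOn, hyOff⟩ := pvSpanSome _ _ _ _ hr0 hsy
      obtain ⟨hx0, hxb, hxOn, hxOff⟩ := pvSpanSome _ _ _ _ hc0 hsx
      have hby' : ky ≤ a1.1 + (m.length : Int) := by
        rw [max_def, max_def] at hyb
        split_ifs at hyb <;> omega
      have hbx' : kx ≤ a1.2 + PySem.Str.len (PySem.List.pyGetD m 0 "") := by
        rw [max_def, max_def] at hxb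
        split_ifs at hxb <;> omega
      refine ⟨min ky kx, rfl, by omega, by omega, ?_, ?_⟩
      · intro i hi1 hiK
        rw [pvOnMapIff]
        exact ⟨hyOn i hi1 (by omega), hxOn i hi1 (by omega)⟩
      · rw [← Bool.not_eq_true, pvOnMapIff]
        rcases le_total ky kx with hcmp | hcmp
        · rw [min_eq_left hcmp]
          rintro ⟨hrow, -⟩
          exact hyOff hrow
        · rw [min_eq_right hcmp]
          rintro ⟨-, hcol⟩
          exact hxOff hcol
  have hwalk := pvWalkEq m a1.1 a1.2 dy dx K hOn hOff
      (m.length + (PySem.Str.len (PySem.List.pyGetD m 0 "")).toNat + a1.2.natAbs + 2)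
      1 [] le_rfl (by omega) (by omega)
  simp only [one_mul] at hwalk
  have hG : get_antinodes_on_vector m (get_antenna_vector a1 a2) a1
      = (PySem.List.pyRange 1 (K + 1) 1).foldl
          (fun a i => PySem.Set.add a (a1.1 + i * dy, a1.2 + i * dx)) [] := by
    show walkA m (PySem.Int.truncdiv (a1.1 - a2.1) g, PySem.Int.truncdiv (a1.2 - a2.2) g)
        (m.length + (PySem.Str.len (PySem.List.pyGetD m 0 "")).toNat + a1.2.natAbs + 2)
        (a1.1 + PySem.Int.truncdiv (a1.1 - a2.1) g, a1.2 + PySem.Int.truncdiv (a1.2 - a2.2) g) []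
      = _
    rw [htd1, htd2]
    exact hwalk
  rw [hG, ← PySem.Set.update_map_eq_foldl_add, PySem.Set.update_nil_left]
  show PySem.Set.ofList
      ((PySem.List.pyRange 1 (K + 1) 1).map (fun i => (a1.1 + i * dy, a1.2 + i * dx))) = _
  simp only [pvRay]
  rw [← hgdef, ← hdydef, ← hdxdef, hKmatch]

-- fold of an accumulator-append body is the flat concatenation of its blocks
lemma pvFoldAppend {a b : Type} (F : List b → a → List b) (g : a → List b)
    (l : List a) (h : ∀ (c : List b) (x : a), x ∈ l → F c x = c ++ g x) :
    ∀ c0 : List b, l.foldl F c0 = c0 ++ l.flatMap g := by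
  induction l with
  | nil => intro c0; simp
  | cons x t ih =>
    intro c0
    simp only [List.foldl_cons, List.flatMap_cons]
    rw [h c0 x (List.mem_cons_self ..),
        ih (fun c y hy => h c y (List.mem_cons_of_mem _ hy)) (c0 ++ g x), List.append_assoc]

-- the same fold shape, threaded through ofList (A's set accumulator)
lemma pvFoldOfList {a b : Type} [BEq b] [LawfulBEq b]
    (F : PySem.Set b → a → PySem.Set b) (g : a → List b)
    (l : List a)
    (h : ∀ (c : List b) (x : a), x ∈ l → F (PySem.Set.ofList c) x = PySem.Set.ofList (c ++ g x)) :
    ∀ c0 : List b, l.foldl F (PySem.Set.ofList c0) = PySem.Set.ofList (c0 ++ l.flatMap g) := by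
  induction l with
  | nil => intro c0; simp
  | cons x t ih =>
    intro c0
    simp only [List.foldl_cons, List.flatMap_cons]
    rw [h c0 x (List.mem_cons_self ..),
        ih (fun c y hy => h c y (List.mem_cons_of_mem _ hy)) (c0 ++ g x), List.append_assoc]

-- the shared candidate stream: per frequency, the locations block then every pair's ray
def pvBlock (m : List String) (locs : List (Int × Int)) : List (Int × Int) :=
  (if locs.length > 1 then locs else []) ++
    locs.flatMap (fun a1 => locs.flatMap (fun a2 => if a1 = a2 then [] else pvRay m a1 a2))

-- A's per-frequency loop body, from an ofList accumulator
lemma pvBodyA (m : List String) (c : List (Int × Int)) (f : Char) :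
    (get_antenna_locations_by_frequency m f).foldl (fun harmonic_antinodes ant1 =>
      (get_antenna_locations_by_frequency m f).foldl (fun harmonic_antinodes ant2 =>
        if ant1 ≠ ant2 then
          PySem.Set.ofList (PySem.Set.union harmonic_antinodes
            (get_antinodes_on_vector m (get_antenna_vector ant1 ant2) ant1))
        else harmonic_antinodes) harmonic_antinodes)
      (if (get_antenna_locations_by_frequency m f).length > 1 then
        PySem.Set.ofList (PySem.Set.union (PySem.Set.ofList c)
          (PySem.Set.ofList (get_antenna_locations_by_frequency m f)))
      else PySem.Set.ofList c)
    = PySem.Set.ofList (c ++ pvBlock m (get_antenna_locations_by_frequency m f)) := by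
  have hpair : ∀ (a1 : Int × Int), a1 ∈ get_antenna_locations_by_frequency m f →
      ∀ (c'' : List (Int × Int)) (a2 : Int × Int), a2 ∈ get_antenna_locations_by_frequency m f →
      (if a1 ≠ a2 then
         PySem.Set.ofList (PySem.Set.union (PySem.Set.ofList c'')
           (get_antinodes_on_vector m (get_antenna_vector a1 a2) a1))
       else PySem.Set.ofList c'')
      = PySem.Set.ofList (c'' ++ if a1 = a2 then [] else pvRay m a1 a2) := by
    intro a1 ha1 c'' a2 _
    by_cases h12 : a1 = a2
    · rw [if_neg (by simpa using h12), if_pos h12, List.append_nil]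
    · rw [if_pos (by simpa using h12), if_neg h12,
          pvAnti m a1 a2 (pvLocsMem m f a1 ha1) h12, pvUnion]
  have hmid : ∀ (c' : List (Int × Int)) (a1 : Int × Int),
      a1 ∈ get_antenna_locations_by_frequency m f →
      (get_antenna_locations_by_frequency m f).foldl (fun harmonic_antinodes ant2 =>
        if a1 ≠ ant2 then
          PySem.Set.ofList (PySem.Set.union harmonic_antinodes
            (get_antinodes_on_vector m (get_antenna_vector a1 ant2) a1))
        else harmonic_antinodes) (PySem.Set.ofList c')
      = PySem.Set.ofList (c' ++ (get_antenna_locations_by_frequency m f).flatMap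
          (fun a2 => if a1 = a2 then [] else pvRay m a1 a2)) := by
    intro c' a1 ha1
    exact pvFoldOfList _ _ _ (fun c'' a2 ha2 => hpair a1 ha1 c'' a2 ha2) c'
  have hstep1 : (if (get_antenna_locations_by_frequency m f).length > 1 then
        PySem.Set.ofList (PySem.Set.union (PySem.Set.ofList c)
          (PySem.Set.ofList (get_antenna_locations_by_frequency m f)))
      else PySem.Set.ofList c)
      = PySem.Set.ofList (c ++ (if (get_antenna_locations_by_frequency m f).length > 1 then
          get_antenna_locations_by_frequency m f else [])) := by
    split_ifs with h
    · exact pvUnion c _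
    · rw [List.append_nil]
  rw [hstep1]
  have hall := pvFoldOfList
      (F := fun harmonic_antinodes ant1 =>
        (get_antenna_locations_by_frequency m f).foldl (fun harmonic_antinodes ant2 =>
          if ant1 ≠ ant2 then
            PySem.Set.ofList (PySem.Set.union harmonic_antinodes
              (get_antinodes_on_vector m (get_antenna_vector ant1 ant2) ant1))
          else harmonic_antinodes) harmonic_antinodes)
      (g := fun a1 => (get_antenna_locations_by_frequency m f).flatMap
          (fun a2 => if a1 = a2 then [] else pvRay m a1 a2))
      (get_antenna_locations_by_frequency m f)
      (fun c' a1 ha1 => hmid c' a1 ha1)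
      (c ++ (if (get_antenna_locations_by_frequency m f).length > 1 then
          get_antenna_locations_by_frequency m f else []))
  rw [hall, List.append_assoc]
  rfl

-- A's whole accumulation is the ofList of the candidate stream
lemma pvSideA (m : List String) :
    get_harmonic_antinodes m
    = PySem.Set.ofList ((get_frequencies m).flatMap
        (fun f => pvBlock m (get_antenna_locations_by_frequency m f))) := by
  unfold get_harmonic_antinodes
  rw [show ([] : PySem.Set (Int × Int)) = PySem.Set.ofList [] from rfl]
  have hall := pvFoldOfList
      (F := fun harmonic_antinodes frequency =>
        let antenna_locations := get_antenna_locations_by_frequency m frequency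
        let harmonic_antinodes :=
          if antenna_locations.length > 1 then
            PySem.Set.ofList (PySem.Set.union harmonic_antinodes
              (PySem.Set.ofList antenna_locations))
          else harmonic_antinodes
        antenna_locations.foldl (fun harmonic_antinodes ant1 =>
          antenna_locations.foldl (fun harmonic_antinodes ant2 =>
            if ant1 ≠ ant2 then
              PySem.Set.ofList (PySem.Set.union harmonic_antinodes
                (get_antinodes_on_vector m (get_antenna_vector ant1 ant2) ant1))
            else harmonic_antinodes) harmonic_antinodes) harmonic_antinodes)
      (g := fun f => pvBlock m (get_antenna_locations_by_frequency m f))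
      (get_frequencies m)
      (fun c f _ => pvBodyA m c f)
      []
  rw [hall, List.nil_append]

-- B's per-frequency loop body, on the plain candidate list
lemma pvBodyB (m : List String) (c : List (Int × Int)) (L : List (Int × Int)) :
    L.foldl (fun candidates a1 =>
      L.foldl (fun candidates a2 =>
        if a1 = a2 then candidates
        else candidates ++ pvRay m a1 a2) candidates)
      (if L.length > 1 then c ++ L else c)
    = c ++ pvBlock m L := by
  have hmid : ∀ (c' : List (Int × Int)) (a1 : Int × Int), a1 ∈ L →
      L.foldl (fun candidates a2 =>
        if a1 = a2 then candidates else candidates ++ pvRay m a1 a2) c'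
      = c' ++ L.flatMap (fun a2 => if a1 = a2 then [] else pvRay m a1 a2) := by
    intro c' a1 _
    refine pvFoldAppend _ _ L (fun c'' a2 _ => ?_) c'
    by_cases h12 : a1 = a2
    · rw [if_pos h12, if_pos h12, List.append_nil]
    · rw [if_neg h12, if_neg h12]
  have hstep1 : (if L.length > 1 then c ++ L else c)
      = c ++ (if L.length > 1 then L else []) := by
    split_ifs with h
    · rfl
    · rw [List.append_nil]
  rw [hstep1]
  have hall := pvFoldAppend
      (F := fun candidates a1 =>
        L.foldl (fun candidates a2 =>
          if a1 = a2 then candidates else candidates ++ pvRay m a1 a2) candidates)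
      (g := fun a1 => L.flatMap (fun a2 => if a1 = a2 then [] else pvRay m a1 a2))
      L (fun c' a1 ha1 => hmid c' a1 ha1)
      (c ++ (if L.length > 1 then L else []))
  rw [hall, List.append_assoc]
  rfl

-- B's candidate list is the same stream
lemma pvSideB (m : List String) :
    get_harmonic_antinodes_alt m
    = PySem.Set.ofList ((get_frequencies m).flatMap
        (fun f => pvBlock m (get_antenna_locations_by_frequency m f))) := by
  simp only [get_harmonic_antinodes_alt]
  rw [pvSpotsFlat,
      PySem.Dict.values_eq_map_keys ((pvOcc m).foldl pvDStep PySem.Dict.empty)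
        (pvKeysNodup m) [],
      List.foldl_map, pvKeys]
  congr 1
  have hstep : ∀ (c : List (Int × Int)) (f : Char), f ∈ get_frequencies m →
      (fun candidates antennas =>
        let candidates := if antennas.length > 1 then candidates ++ antennas else candidates
        antennas.foldl (fun candidates a1 =>
          antennas.foldl (fun candidates a2 =>
            if a1 = a2 then candidates
            else candidates ++ pvRay m a1 a2) candidates) candidates)
        c (((pvOcc m).foldl pvDStep PySem.Dict.empty).getD f [])
      = c ++ pvBlock m (get_antenna_locations_by_frequency m f) := by
    intro c f hf
    rw [pvLocs m f (pvFreqNoDot m f hf)]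
    exact pvBodyB m c (get_antenna_locations_by_frequency m f)
  exact (pvFoldAppend _ (fun f => pvBlock m (get_antenna_locations_by_frequency m f))
      (get_frequencies m) hstep []).trans (List.nil_append _)

-- ===== VERDICT (by name: the statement is the Claim_ definition above) =====
theorem get_harmonic_antinodes_spec : Claim_equal_get_harmonic_antinodes := by
  intro antenna_map _
  unfold Spec_get_harmonic_antinodes
  rw [pvSideA, pvSideB]
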